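-- pv_equiv track=rewrite | github.com/fstrauf/pageseeds-cli | packages/seo-content-cli/src/seo_content_mcp/server.py | _get_sample_indices
-- ===== SOURCE A (Python) =====
-- def _get_sample_indices(article_count: int) -> list[int]:
--     """
--     Get sample indices to show in distribution.
--     Shows first 5, middle, and last 5 articles.
--     """
--     if article_count <= 12:
--         # Show all if small
--         return list(range(article_count))
--
--     indices = set()
--
--     # First 5
--     for i in range(min(5, article_count)):
--         indices.add(i)
--
--     # Middle
--     indices.add(article_count // 2)
--
--     # Last 5
--     for i in range(max(0, article_count - 5), article_count):
--         indices.add(i)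
--
--     return sorted(list(indices))
-- ===== SOURCE B (Python) =====
-- def _get_sample_indices(article_count: int) -> list[int]:
--     """
--     Compute the j-th sample index directly with a closed-form piecewise
--     formula over output positions: for n > 12 the output always has exactly
--     11 entries, position j holding j (first five), n // 2 (position 5), or
--     n - 11 + j (last five).  No set, no sort, no block accumulation.
--     """
--     n = article_count
--     if n <= 12:
--         return [j for j in range(n)]
--     return [j if j < 5 else n // 2 if j == 5 else n - 11 + j for j in range(11)]
-- ===== Notes on version B (the rewrite author's own statement) =====
-- stated objective: alternative
-- what changed: B computes the j-th output element directly by a closed-form piecewise position formula (j for the leading block, article_count//2 at the middle position, article_count-11+j for the trailing block) in one comprehension over the output positions, instead of A's strategy of accumulating three index blocks into a set and then sorting it.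
import Mathlib
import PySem

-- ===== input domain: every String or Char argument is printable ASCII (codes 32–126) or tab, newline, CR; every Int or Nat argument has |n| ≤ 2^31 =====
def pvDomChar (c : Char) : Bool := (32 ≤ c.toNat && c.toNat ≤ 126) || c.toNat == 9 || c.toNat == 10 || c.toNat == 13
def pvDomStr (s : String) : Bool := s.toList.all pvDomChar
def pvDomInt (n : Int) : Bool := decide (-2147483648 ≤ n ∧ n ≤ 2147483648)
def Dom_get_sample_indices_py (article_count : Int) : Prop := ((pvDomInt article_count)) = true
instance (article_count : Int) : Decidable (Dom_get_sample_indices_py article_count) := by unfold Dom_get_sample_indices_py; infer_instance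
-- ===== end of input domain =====

-- B replaces A's "accumulate three index blocks into a set, then sort" with one map
-- computing each output position by a closed-form piecewise formula (alternative; same cost class).

-- ===== PORT A =====
def get_sample_indices_py (article_count : Int) : List Int :=
  if article_count ≤ 12 then
    PySem.List.pyRange 0 article_count 1
  else
    let indices : PySem.Set Int := PySem.Set.empty
    -- First 5
    let indices := (PySem.List.pyRange 0 (min 5 article_count) 1).foldl PySem.Set.add indices
    -- Middle
    let indices := PySem.Set.add indices (PySem.Int.floordiv article_count 2)
    -- Last 5
    let indices := (PySem.List.pyRange (max 0 (article_count - 5)) article_count 1).foldl PySem.Set.add indices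
    PySem.List.sorted indices (fun x => x) false

-- ===== PORT B =====
def get_sample_indices_py_alt (article_count : Int) : List Int :=
  if article_count ≤ 12 then
    (PySem.List.pyRange 0 article_count 1).map (fun j => j)
  else
    (PySem.List.pyRange 0 11 1).map (fun j =>
      if j < 5 then j
      else if j = 5 then PySem.Int.floordiv article_count 2
      else article_count - 11 + j)

-- ===== PRECONDITION & SPEC =====
def Spec_get_sample_indices_py (article_count : Int) (out : List Int) : Prop := out = get_sample_indices_py_alt article_count
instance (article_count : Int) (out : List Int) : Decidable (Spec_get_sample_indices_py article_count out) := by unfold Spec_get_sample_indices_py; infer_instance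

-- ===== CLAIM (what is proved, stated in full; the proofs are below) =====
def Claim_equal_get_sample_indices_py : Prop := ∀ (article_count : Int), Dom_get_sample_indices_py article_count → Spec_get_sample_indices_py article_count (get_sample_indices_py article_count)

-- ===== LEMMAS AND PROOFS =====

lemma set_add_not_mem {s : List Int} {x : Int} (h : x ∉ s) :
    PySem.Set.add s x = s ++ [x] := by
  simp [PySem.Set.add, PySem.Set.contains, h]

-- ===== VERDICT (by name: the statement is the Claim_ definition above) =====
theorem get_sample_indices_py_spec : Claim_equal_get_sample_indices_py := by
  intro n _
  show get_sample_indices_py n = get_sample_indices_py_alt n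
  unfold get_sample_indices_py get_sample_indices_py_alt
  by_cases h : n ≤ 12
  · simp [h]
  · simp only [if_neg h]
    have hn : 13 ≤ n := by omega
    set m := PySem.Int.floordiv n 2 with hmdef
    have hm : m = n / 2 := PySem.Int.floordiv_eq_ediv_of_pos (by omega)
    have hm1 : 6 ≤ m := by omega
    have hm2 : m ≤ n - 7 := by omega
    have hmin : min 5 n = 5 := by omega
    have hmax : max 0 (n - 5) = n - 5 := by omega
    rw [hmin, hmax]
    have h1 : (PySem.List.pyRange 0 5 1).foldl PySem.Set.add PySem.Set.empty
        = [0, 1, 2, 3, 4] := by decide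
    rw [h1]
    have h2 : PySem.Set.add [0, 1, 2, 3, 4] m = [0, 1, 2, 3, 4, m] := by
      rw [set_add_not_mem (by simp; omega)]; rfl
    rw [h2]
    have hr : PySem.List.pyRange (n - 5) n 1 = [n - 5, n - 4, n - 3, n - 2, n - 1] := by
      rw [PySem.List.pyRange_one_cons (by omega), PySem.List.pyRange_one_cons (by omega),
          PySem.List.pyRange_one_cons (by omega), PySem.List.pyRange_one_cons (by omega),
          PySem.List.pyRange_one_cons (by omega), PySem.List.pyRange_one_eq_nil (by omega)]
      norm_num
      omega
    rw [hr]
    have h3 : ([n - 5, n - 4, n - 3, n - 2, n - 1] : List Int).foldl PySem.Set.add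
        [0, 1, 2, 3, 4, m]
        = [0, 1, 2, 3, 4, m, n - 5, n - 4, n - 3, n - 2, n - 1] := by
      simp only [List.foldl]
      rw [set_add_not_mem (by simp; omega)]
      rw [set_add_not_mem (by simp; omega)]
      rw [set_add_not_mem (by simp; omega)]
      rw [set_add_not_mem (by simp; omega)]
      rw [set_add_not_mem (by simp; omega)]
      simp
    rw [h3]
    have hsorted : PySem.List.sorted
        ([0, 1, 2, 3, 4, m, n - 5, n - 4, n - 3, n - 2, n - 1] : List Int)
        (fun x => x) false
        = [0, 1, 2, 3, 4, m, n - 5, n - 4, n - 3, n - 2, n - 1] :=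
      PySem.List.sorted_eq_of_perm_of_pairwise_lt _ _ (fun x => x) (List.Perm.refl _)
        (by simp [List.pairwise_cons]; omega)
    rw [hsorted]
    have hb : PySem.List.pyRange 0 11 1
        = ([0, 1, 2, 3, 4, 5, 6, 7, 8, 9, 10] : List Int) := by decide
    rw [hb]
    simp only [List.map]
    norm_num
    omega
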